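-- pv_equiv track=rewrite | github.com/csvoss/traceroute | traceroutevisualize/views.py | makeHtmlStrings
-- ===== SOURCE A (Python) =====
-- def makeHtmlStrings(dataList):
--     oldLat = "142857"
--     oldLng = "142857"
--     oldISP = ""
--     oldIP = ""
--     buildContent = ""
--     output = []
--     i = 1
--     for (lat, lng, isp, ip) in dataList:
--         if not (lat==oldLat and lng==oldLng and isp==oldISP):
--             buildContent += "</div>"
--             output.append((oldLat, oldLng, buildContent, oldIP))
--             buildContent = "<div class=hacker><u>"+isp+"</u><br>"
--         if i==1:
--             buildContent += "START<br>"
--         buildContent += "Step "+str(i)+": <i>"+ip+"</i><br>"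
--
--         i+=1
--
--         oldLat = lat
--         oldLng = lng
--         oldISP = isp
--         oldIP = ip
--
--     buildContent += "END</div>"
--     output.append((oldLat, oldLng, buildContent, oldIP))
--
--     return output[1:]
-- ===== SOURCE B (Python) =====
-- from itertools import groupby
--
--
-- def makeHtmlStrings(dataList):
--     # Group consecutive records by (lat, lng, isp), then render one HTML block
--     # per group; a global step counter threads through the groups.
--     groups = [(key, list(grp))
--               for key, grp in groupby(dataList, key=lambda r: (r[0], r[1], r[2]))]
--     output = []
--     step = 1
--     for gi, ((lat, lng, isp), recs) in enumerate(groups):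
--         content = "<div class=hacker><u>" + isp + "</u><br>"
--         for rec in recs:
--             if step == 1:
--                 content += "START<br>"
--             content += "Step " + str(step) + ": <i>" + rec[3] + "</i><br>"
--             step += 1
--         content += "END</div>" if gi == len(groups) - 1 else "</div>"
--         output.append((lat, lng, content, recs[-1][3]))
--     return output
-- ===== Notes on version B (the rewrite author's own statement) =====
-- stated objective: alternative
-- what changed: B replaces A's single-pass sentinel state machine (sentinel start key '142857', deferred flush of the previous block, output[1:] to drop the sentinel block) with itertools.groupby over (lat,lng,isp) followed by a per-group rendering pass with a threaded step counter.
-- intended difference: When the first record's (lat,lng,isp) equals A's internal sentinel ('142857','142857',''), A never opens a first block and its output[1:] silently drops the entire first group from the result, while B renders the first group like any other; B's value is the intended one. — e.g. on makeHtmlStrings([("142857", "142857", "", "1.2.3.4")]): A returns [], B returns [("142857", "142857", "<div class=hacker><u></u><br>START<br>Step 1: <i>1.2.3.4</i><br>END</div>", "1.2.3.4")]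
import Mathlib
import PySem

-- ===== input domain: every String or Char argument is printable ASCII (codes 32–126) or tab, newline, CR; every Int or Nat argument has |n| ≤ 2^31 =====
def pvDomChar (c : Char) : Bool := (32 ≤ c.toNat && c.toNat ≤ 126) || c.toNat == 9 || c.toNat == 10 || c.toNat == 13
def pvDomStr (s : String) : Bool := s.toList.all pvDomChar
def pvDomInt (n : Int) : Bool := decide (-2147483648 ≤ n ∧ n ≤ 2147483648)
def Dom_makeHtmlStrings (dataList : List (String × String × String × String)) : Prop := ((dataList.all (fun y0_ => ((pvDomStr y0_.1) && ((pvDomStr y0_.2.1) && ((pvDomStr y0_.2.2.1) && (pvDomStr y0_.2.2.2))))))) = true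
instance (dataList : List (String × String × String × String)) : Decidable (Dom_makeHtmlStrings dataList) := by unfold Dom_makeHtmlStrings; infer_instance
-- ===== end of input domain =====

-- B re-implements the sentinel-state machine as groupby-then-render (different decomposition,
-- same cost); on the degenerate first record ("142857","142857","",·) A silently drops the
-- whole first group (see D_ below) while B renders it.

abbrev PvRec := String × String × String × String

-- ===== PORT A =====
-- state = (oldLat, oldLng, oldISP, oldIP, buildContent, output, i), exactly A's loop body
def pvStepA (st : String × String × String × String × String × List PvRec × Int)
    (r : PvRec) : String × String × String × String × String × List PvRec × Int :=
  let (oldLat, oldLng, oldISP, oldIP, buildContent, output, i) := st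
  let (lat, lng, isp, ip) := r
  let (buildContent, output) :=
    if ¬(lat = oldLat ∧ lng = oldLng ∧ isp = oldISP) then
      ("<div class=hacker><u>" ++ isp ++ "</u><br>",
       output ++ [(oldLat, oldLng, buildContent ++ "</div>", oldIP)])
    else (buildContent, output)
  let buildContent := if i = 1 then buildContent ++ "START<br>" else buildContent
  let buildContent := buildContent ++ "Step " ++ PySem.Int.toStr i ++ ": <i>" ++ ip ++ "</i><br>"
  (lat, lng, isp, ip, buildContent, output, i + 1)

def makeHtmlStrings (dataList : List (String × String × String × String)) :
    List (String × String × String × String) :=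
  let st := dataList.foldl pvStepA ("142857", "142857", "", "", "", ([] : List PvRec), (1 : Int))
  -- st = (oldLat, oldLng, oldISP, oldIP, buildContent, output, i); then the final flush and output[1:]
  (st.2.2.2.2.2.1 ++ [(st.1, st.2.1, st.2.2.2.2.1 ++ "END</div>", st.2.2.2.1)]).drop 1

-- ===== PORT B =====
def pvKey (r : PvRec) : String × String × String := (r.1, r.2.1, r.2.2.1)

-- itertools.groupby over pvKey, collecting each consecutive run in order
def pvGroupBy (k : String × String × String) (run : List PvRec) :
    List PvRec → List ((String × String × String) × List PvRec)
  | [] => [(k, run)]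
  | r :: rs =>
    if pvKey r = k then pvGroupBy k (run ++ [r]) rs
    else (k, run) :: pvGroupBy (pvKey r) [r] rs

-- inner loop of Source B: one record appended to the group's content, step counter advanced
def pvEntry (cs : String × Int) (r : PvRec) : String × Int :=
  let (content, step) := cs
  let content := if step = 1 then content ++ "START<br>" else content
  (content ++ "Step " ++ PySem.Int.toStr step ++ ": <i>" ++ r.2.2.2 ++ "</i><br>", step + 1)

-- recs[-1][3]; every group produced by pvGroupBy is nonempty, so the "" default is never used
def pvLastIp (recs : List PvRec) : String :=
  ((recs.getLast?).map (fun r => r.2.2.2)).getD ""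

def pvRender (step : Int) :
    List ((String × String × String) × List PvRec) → List PvRec
  | [] => []
  | ((lat, lng, isp), recs) :: gs =>
    let cs := recs.foldl pvEntry ("<div class=hacker><u>" ++ isp ++ "</u><br>", step)
    (lat, lng, cs.1 ++ (if gs = [] then "END</div>" else "</div>"), pvLastIp recs) :: pvRender cs.2 gs

def makeHtmlStrings_alt (dataList : List (String × String × String × String)) :
    List (String × String × String × String) :=
  match dataList with
  | [] => []
  | r :: rs => pvRender 1 (pvGroupBy (pvKey r) [r] rs)

-- ===== PRECONDITION & SPEC =====
-- When the first record's (lat,lng,isp) equals A's sentinel ("142857","142857",""), A never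
-- opens the first group and its output[1:] silently discards that entire first group, while B
-- renders it like any other group — B's value is the intended one.
def D_makeHtmlStrings (dataList : List (String × String × String × String)) : Prop :=
  dataList ≠ [] ∧ (dataList.headI).1 = "142857" ∧ (dataList.headI).2.1 = "142857" ∧ (dataList.headI).2.2.1 = ""

instance (dataList : List (String × String × String × String)) : Decidable (D_makeHtmlStrings dataList) := by
  unfold D_makeHtmlStrings; infer_instance

def Spec_makeHtmlStrings (dataList : List (String × String × String × String)) (out : List (String × String × String × String)) : Prop :=
  ¬ D_makeHtmlStrings dataList → out = makeHtmlStrings_alt dataList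

instance (dataList : List (String × String × String × String)) (out : List (String × String × String × String)) : Decidable (Spec_makeHtmlStrings dataList out) := by
  unfold Spec_makeHtmlStrings; infer_instance

def pvDiffWitness_makeHtmlStrings : (List (String × String × String × String)) :=
  [("142857", "142857", "", "1.2.3.4")]

def pvDiffWitnessOut_makeHtmlStrings :
    (List (String × String × String × String)) × (List (String × String × String × String)) :=
  ([], [("142857", "142857",
        "<div class=hacker><u></u><br>START<br>Step 1: <i>1.2.3.4</i><br>END</div>", "1.2.3.4")])

-- ===== CLAIM =====
def Claim_unchanged_makeHtmlStrings : Prop := ∀ (dataList : List (String × String × String × String)), Dom_makeHtmlStrings dataList → Spec_makeHtmlStrings dataList (makeHtmlStrings dataList)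
def Claim_changed_makeHtmlStrings : Prop := Dom_makeHtmlStrings (pvDiffWitness_makeHtmlStrings) ∧ D_makeHtmlStrings (pvDiffWitness_makeHtmlStrings) ∧ makeHtmlStrings (pvDiffWitness_makeHtmlStrings) = pvDiffWitnessOut_makeHtmlStrings.1 ∧ makeHtmlStrings_alt (pvDiffWitness_makeHtmlStrings) = pvDiffWitnessOut_makeHtmlStrings.2 ∧ pvDiffWitnessOut_makeHtmlStrings.1 ≠ pvDiffWitnessOut_makeHtmlStrings.2
def Claim_exact_makeHtmlStrings : Prop := ∀ (dataList : List (String × String × String × String)), Dom_makeHtmlStrings dataList → D_makeHtmlStrings dataList → makeHtmlStrings dataList ≠ makeHtmlStrings_alt dataList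

-- ===== LEMMAS AND PROOFS =====

-- A's loop, rewritten as the list it still has to emit (proof helper)
def pvContin (oL oG oI oP bc : String) (i : Int) : List PvRec → List PvRec
  | [] => [(oL, oG, bc ++ "END</div>", oP)]
  | (lat, lng, isp, ip) :: rs =>
    if lat = oL ∧ lng = oG ∧ isp = oI then
      pvContin lat lng isp ip (pvEntry (bc, i) (lat, lng, isp, ip)).1 (i + 1) rs
    else
      (oL, oG, bc ++ "</div>", oP) ::
        pvContin lat lng isp ip
          (pvEntry ("<div class=hacker><u>" ++ isp ++ "</u><br>", i) (lat, lng, isp, ip)).1 (i + 1) rs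

lemma pvLA : ∀ (xs : List PvRec) (oL oG oI oP bc : String) (out : List PvRec) (i : Int),
    (let st := xs.foldl pvStepA (oL, oG, oI, oP, bc, out, i);
     st.2.2.2.2.2.1 ++ [(st.1, st.2.1, st.2.2.2.2.1 ++ "END</div>", st.2.2.2.1)])
      = out ++ pvContin oL oG oI oP bc i xs := by
  intro xs
  induction xs with
  | nil => intro oL oG oI oP bc out i; simp [pvContin]
  | cons r rs ih =>
    intro oL oG oI oP bc out i
    obtain ⟨lat, lng, isp, ip⟩ := r
    by_cases h : lat = oL ∧ lng = oG ∧ isp = oI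
    · simp only [List.foldl_cons, pvStepA, pvContin, pvEntry, h]
      simp [h, ih]
    · simp only [List.foldl_cons, pvStepA, pvContin, pvEntry, h]
      simp [ih, List.append_assoc]

-- the string a group's records contribute, entry by entry
def pvEntries (i : Int) : List PvRec → String
  | [] => ""
  | r :: rs =>
    ((if i = 1 then "START<br>" else "") ++ "Step " ++ PySem.Int.toStr i ++ ": <i>" ++ r.2.2.2 ++ "</i><br>")
      ++ pvEntries (i + 1) rs

lemma pvLE : ∀ (recs : List PvRec) (c : String) (i : Int),
    recs.foldl pvEntry (c, i) = (c ++ pvEntries i recs, i + recs.length) := by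
  intro recs
  induction recs with
  | nil => intro c i; simp [pvEntries]
  | cons r rs ih =>
    intro c i
    simp only [List.foldl_cons, pvEntry, pvEntries, ih]
    by_cases h : i = 1 <;> simp [h, List.length_cons, String.append_assoc] <;> omega

lemma pvEntries_snoc : ∀ (run : List PvRec) (i : Int) (r : PvRec),
    pvEntries i (run ++ [r])
      = pvEntries i run ++ ((if i + run.length = 1 then "START<br>" else "") ++ "Step "
          ++ PySem.Int.toStr (i + run.length) ++ ": <i>" ++ r.2.2.2 ++ "</i><br>") := by
  intro run
  induction run with
  | nil => intro i r; simp [pvEntries]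
  | cons x xs ih =>
    intro i r
    simp only [List.cons_append, pvEntries, ih, List.length_cons, String.append_assoc,
      Nat.cast_add, Nat.cast_one]
    have : i + 1 + (xs.length : Int) = i + ((xs.length : Int) + 1) := by ring
    rw [this]

lemma pvGroupBy_ne_nil : ∀ (rs : List PvRec) (k : String × String × String) (run : List PvRec),
    pvGroupBy k run rs ≠ [] := by
  intro rs
  induction rs with
  | nil => intro k run; simp [pvGroupBy]
  | cons r rs ih =>
    intro k run
    by_cases h : pvKey r = k <;> simp [pvGroupBy, h, ih]

lemma pvL2 : ∀ (rs : List PvRec) (kl kg ki : String) (run : List PvRec) (i : Int),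
    pvContin kl kg ki (pvLastIp run)
        (("<div class=hacker><u>" ++ ki ++ "</u><br>") ++ pvEntries i run) (i + run.length) rs
      = pvRender i (pvGroupBy (kl, kg, ki) run rs) := by
  intro rs
  induction rs with
  | nil =>
    intro kl kg ki run i
    simp [pvContin, pvGroupBy, pvRender, pvLE]
  | cons r rs ih =>
    intro kl kg ki run i
    obtain ⟨lat, lng, isp, ip⟩ := r
    by_cases h : lat = kl ∧ lng = kg ∧ isp = ki
    · obtain ⟨rfl, rfl, rfl⟩ := h
      have hk : pvKey (lat, lng, isp, ip) = (lat, lng, isp) := by simp [pvKey]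
      rw [pvGroupBy]
      simp only [hk, if_pos]
      rw [pvContin]
      simp only [and_self, if_pos]
      have hbc : (pvEntry (("<div class=hacker><u>" ++ isp ++ "</u><br>") ++ pvEntries i run,
          i + (run.length : Int)) (lat, lng, isp, ip)).1
          = ("<div class=hacker><u>" ++ isp ++ "</u><br>") ++ pvEntries i (run ++ [(lat, lng, isp, ip)]) := by
        rw [pvEntries_snoc]
        by_cases h1 : i + (run.length : Int) = 1 <;>
          simp [pvEntry, h1, String.append_assoc] <;>
          try simp [← String.append_assoc]
      have hip : pvLastIp (run ++ [(lat, lng, isp, ip)]) = ip := by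
        simp [pvLastIp]
      have hlen : i + (run.length : Int) + 1 = i + (((run ++ [(lat, lng, isp, ip)]).length : Int)) := by
        simp; omega
      have hIH := ih lat lng isp (run ++ [(lat, lng, isp, ip)]) i
      rw [hip] at hIH
      rw [hbc, hlen]
      exact hIH
    · have hk : ¬ pvKey (lat, lng, isp, ip) = (kl, kg, ki) := by
        simp only [pvKey, Prod.mk.injEq]
        intro hh; exact h ⟨hh.1, hh.2.1, hh.2.2⟩
      rw [pvGroupBy]
      simp only [hk, ite_false]
      rw [pvContin]
      simp only [h, ite_false]
      rw [pvRender]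
      rw [if_neg (pvGroupBy_ne_nil rs (pvKey (lat, lng, isp, ip)) [(lat, lng, isp, ip)])]
      simp only [pvLE]
      refine List.cons_eq_cons.mpr ⟨rfl, ?_⟩
      have hbc : (pvEntry ("<div class=hacker><u>" ++ isp ++ "</u><br>",
          i + (run.length : Int)) (lat, lng, isp, ip)).1
          = ("<div class=hacker><u>" ++ isp ++ "</u><br>") ++ pvEntries (i + (run.length : Int)) [(lat, lng, isp, ip)] := by
        by_cases h1 : i + (run.length : Int) = 1 <;>
          simp [pvEntry, pvEntries, h1, String.append_assoc] <;>
          simp [← String.append_assoc]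
      have hip : pvLastIp [(lat, lng, isp, ip)] = ip := by simp [pvLastIp]
      have hlen : i + (run.length : Int) + 1 = (i + (run.length : Int)) + (([(lat, lng, isp, ip)] : List PvRec).length : Int) := by
        simp
      have hkk : pvKey (lat, lng, isp, ip) = (lat, lng, isp) := by simp [pvKey]
      have hIH := ih lat lng isp [(lat, lng, isp, ip)] (i + (run.length : Int))
      rw [hip] at hIH
      rw [hbc, hlen, hkk]
      exact hIH

-- group counts, for the tightness proof
def pvNG (k : String × String × String) : List PvRec → Nat
  | [] => 1
  | r :: rs => if pvKey r = k then pvNG k rs else 1 + pvNG (pvKey r) rs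

lemma pvNG_pos : ∀ (rs : List PvRec) (k : String × String × String), 1 ≤ pvNG k rs := by
  intro rs
  induction rs with
  | nil => intro k; simp [pvNG]
  | cons r rs ih =>
    intro k
    by_cases h : pvKey r = k <;> simp [pvNG, h, ih] <;> omega

lemma pvLenContin : ∀ (rs : List PvRec) (oL oG oI oP bc : String) (i : Int),
    (pvContin oL oG oI oP bc i rs).length = pvNG (oL, oG, oI) rs := by
  intro rs
  induction rs with
  | nil => intro oL oG oI oP bc i; simp [pvContin, pvNG]
  | cons r rs ih =>
    intro oL oG oI oP bc i
    obtain ⟨lat, lng, isp, ip⟩ := r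
    by_cases h : lat = oL ∧ lng = oG ∧ isp = oI
    · simp [pvContin, pvNG, pvKey, ih, h.1, h.2.1, h.2.2]
    · have h' : ¬ pvKey (lat, lng, isp, ip) = (oL, oG, oI) := by
        simp [pvKey, Prod.ext_iff]; intro a b; exact fun c => h ⟨a, b, c⟩
      simp [pvContin, pvNG, h, ih, pvKey]
      omega

lemma pvLenRender : ∀ (gs : List ((String × String × String) × List PvRec)) (i : Int),
    (pvRender i gs).length = gs.length := by
  intro gs
  induction gs with
  | nil => intro i; simp [pvRender]
  | cons g gs ih =>
    intro i
    obtain ⟨⟨lat, lng, isp⟩, recs⟩ := g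
    simp [pvRender, ih]

lemma pvLenGroupBy : ∀ (rs : List PvRec) (k : String × String × String) (run : List PvRec),
    (pvGroupBy k run rs).length = pvNG k rs := by
  intro rs
  induction rs with
  | nil => intro k run; simp [pvGroupBy, pvNG]
  | cons r rs ih =>
    intro k run
    by_cases h : pvKey r = k <;> simp [pvGroupBy, pvNG, h, ih]
    omega

-- ===== VERDICT =====
theorem makeHtmlStrings_spec : Claim_unchanged_makeHtmlStrings := by
  intro dataList _ hD
  cases dataList with
  | nil => decide
  | cons r rs =>
    obtain ⟨lat, lng, isp, ip⟩ := r
    have hk : ¬(lat = "142857" ∧ lng = "142857" ∧ isp = "") := by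
      intro hh
      exact hD ⟨by simp, by simp [List.headI, hh.1], by simp [List.headI, hh.2.1], by simp [List.headI, hh.2.2]⟩
    have h1 := pvLA ((lat, lng, isp, ip) :: rs) "142857" "142857" "" "" "" [] 1
    simp only [] at h1
    show (((((lat, lng, isp, ip) :: rs).foldl pvStepA ("142857", "142857", "", "", "", ([] : List PvRec), (1 : Int))).2.2.2.2.2.1
      ++ [_]).drop 1) = _
    rw [h1]
    rw [pvContin]
    simp only [hk, ite_false, List.nil_append, List.drop_succ_cons, List.drop_zero]
    have hkk : pvKey (lat, lng, isp, ip) = (lat, lng, isp) := by simp [pvKey]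
    have halt : makeHtmlStrings_alt ((lat, lng, isp, ip) :: rs)
        = pvRender 1 (pvGroupBy (pvKey (lat, lng, isp, ip)) [(lat, lng, isp, ip)] rs) := rfl
    rw [halt, hkk, ← pvL2 rs lat lng isp [(lat, lng, isp, ip)] 1]
    have hbc : (pvEntry ("<div class=hacker><u>" ++ isp ++ "</u><br>", (1 : Int)) (lat, lng, isp, ip)).1
        = ("<div class=hacker><u>" ++ isp ++ "</u><br>") ++ pvEntries 1 [(lat, lng, isp, ip)] := by
      simp [pvEntry, pvEntries, String.append_assoc]
      simp [← String.append_assoc]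
    have hip : pvLastIp [(lat, lng, isp, ip)] = ip := by simp [pvLastIp]
    rw [hbc, hip]
    norm_num

theorem makeHtmlStrings_changed : Claim_changed_makeHtmlStrings := by
  unfold Claim_changed_makeHtmlStrings; decide

theorem makeHtmlStrings_tight : Claim_exact_makeHtmlStrings := by
  intro dataList _ hd heq
  cases dataList with
  | nil => exact hd.1 rfl
  | cons r rs =>
    obtain ⟨lat, lng, isp, ip⟩ := r
    obtain ⟨-, h1, h2, h3⟩ := hd
    simp only [List.headI] at h1 h2 h3
    have hlena : (makeHtmlStrings ((lat, lng, isp, ip) :: rs)).length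
        = pvNG (lat, lng, isp) rs - 1 := by
      have hA := pvLA ((lat, lng, isp, ip) :: rs) "142857" "142857" "" "" "" [] 1
      simp only [] at hA
      show ((((((lat, lng, isp, ip) :: rs).foldl pvStepA ("142857", "142857", "", "", "", ([] : List PvRec), (1 : Int))).2.2.2.2.2.1
        ++ [_]).drop 1)).length = _
      rw [hA]
      rw [pvContin]
      simp only [h1, h2, h3, and_self, if_pos, List.nil_append]
      simp [pvLenContin]
    have hlenb : (makeHtmlStrings_alt ((lat, lng, isp, ip) :: rs)).length
        = pvNG (lat, lng, isp) rs := by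
      have hkk : pvKey (lat, lng, isp, ip) = (lat, lng, isp) := by simp [pvKey]
      have halt : makeHtmlStrings_alt ((lat, lng, isp, ip) :: rs)
          = pvRender 1 (pvGroupBy (pvKey (lat, lng, isp, ip)) [(lat, lng, isp, ip)] rs) := rfl
      rw [halt, hkk, pvLenRender, pvLenGroupBy]
    have := congrArg List.length heq
    rw [hlena, hlenb] at this
    have := pvNG_pos rs (lat, lng, isp)
    omega
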